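-- pv_equiv track=rewrite | github.com/wintersalmon/programming-challenges-archive | src/uva/116/uva_116.py | search_shortest_path
-- ===== SOURCE A (Python) =====
-- COST = 0
--
-- PATH = 1
--
-- def find_prev_shortest_path(board, prev_shortest_values, cur_row_idx, cur_col_idx):
--     # the previous path can be one of (up_left, left, down_left)
--     # create next path with each previous (cost, path)
--     # find and return shortest (cost, path)
--     prev_col_idx = cur_col_idx - 1
--     up_row_idx = cur_row_idx - 1 if cur_row_idx > 0 else len(board) - 1
--     mid_row_idx = cur_row_idx
--     down_row_idx = (cur_row_idx + 1) % len(board)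
--
--     up_cost = prev_shortest_values[up_row_idx][prev_col_idx][COST]
--     mid_cost = prev_shortest_values[cur_row_idx][prev_col_idx][COST]
--     down_cost = prev_shortest_values[down_row_idx][prev_col_idx][COST]
--
--     row_cost_pairs = [
--         (up_cost, prev_shortest_values[up_row_idx][prev_col_idx][PATH] + [cur_row_idx]),
--         (mid_cost, prev_shortest_values[mid_row_idx][prev_col_idx][PATH] + [cur_row_idx]),
--         (down_cost, prev_shortest_values[down_row_idx][prev_col_idx][PATH] + [cur_row_idx]),
--     ]
--
--     row_cost_pairs.sort()
--
--     shortest_path = row_cost_pairs[0][PATH]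
--     shortest_path_cost = row_cost_pairs[0][COST]
--
--     return shortest_path, shortest_path_cost
--
-- def search_shortest_path(board):
--     row_size = len(board)
--     col_size = len(board[0])
--
--     # create data structures
--     accumulated_costs = board[:]
--     accumulated_paths = [[[row_idx] for _ in range(col_size)] for row_idx in range(row_size)]
--     accumulated_values = [[[accumulated_costs[r][c], accumulated_paths[r][c]]
--                            for c in range(col_size)] for r in range(row_size)]
--
--     # for each row in each colon, increment each path with shortest previous path
--     for col_idx in range(1, col_size):
--         for row_idx in range(row_size):
--             shortest_path, shortest_cost = find_prev_shortest_path(board, accumulated_values, row_idx, col_idx)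
--             accumulated_values[row_idx][col_idx][PATH] = shortest_path
--             accumulated_values[row_idx][col_idx][COST] = shortest_cost + accumulated_values[row_idx][col_idx][COST]
--
--     # select last colon and sort them with (cost, path) order
--     last_values = [(values[-1][COST], values[-1][PATH]) for values in accumulated_values]
--     last_values.sort()
--
--     return last_values[0][PATH], last_values[0][COST]
-- ===== SOURCE B (Python) =====
-- def search_shortest_path(board):
--     n = len(board)
--     m = len(board[0])
--     # backward DP over costs only: suffix[c][r] = min cost from (r, c) to the last column
--     suffix = [None] * m
--     suffix[m - 1] = [board[r][m - 1] for r in range(n)]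
--     for c in range(m - 2, -1, -1):
--         nxt = suffix[c + 1]
--         suffix[c] = [board[r][c] + min(nxt[(r - 1) % n], nxt[r], nxt[(r + 1) % n])
--                      for r in range(n)]
--     # greedy reconstruction of the lexicographically smallest optimal path
--     start = min(range(n), key=lambda r: suffix[0][r])
--     path = [start]
--     r = start
--     for c in range(1, m):
--         need = suffix[c - 1][r] - board[r][c - 1]
--         r = min(r2 for r2 in ((r - 1) % n, r, (r + 1) % n) if suffix[c][r2] == need)
--         path.append(r)
--     return path, suffix[0][start]
-- ===== Notes on version B (the rewrite author's own statement) =====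
-- stated objective: faster
-- what changed: A runs a forward DP that stores and concatenates an explicit best-path list in every cell and sorts per-cell candidate lists (and the final column); B never stores paths: it runs a backward cost-only DP over columns and then reconstructs the lexicographically smallest optimal path once, by a greedy forward walk choosing the smallest row whose suffix cost equals the remaining optimum.
import Mathlib
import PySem

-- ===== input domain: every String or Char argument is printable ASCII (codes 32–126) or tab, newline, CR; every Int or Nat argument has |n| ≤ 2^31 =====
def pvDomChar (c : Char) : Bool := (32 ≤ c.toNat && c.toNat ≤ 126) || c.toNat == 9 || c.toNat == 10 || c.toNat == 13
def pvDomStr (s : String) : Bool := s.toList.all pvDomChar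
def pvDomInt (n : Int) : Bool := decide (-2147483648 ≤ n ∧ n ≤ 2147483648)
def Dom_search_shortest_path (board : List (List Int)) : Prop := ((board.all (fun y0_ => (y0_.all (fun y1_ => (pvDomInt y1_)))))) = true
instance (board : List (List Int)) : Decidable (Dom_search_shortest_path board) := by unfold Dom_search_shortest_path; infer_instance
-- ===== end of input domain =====

-- B replaces A's forward DP over (cost, path)-pairs (per-cell path concatenation and
-- sorting) by a backward cost-only DP plus one greedy reconstruction of the
-- lexicographically smallest optimal path (objective: faster).

-- ===== PORT A =====
-- Hand-written port of Python's `<` on (int, list[int]) tuples (used by list.sort()):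
-- exact lexicographic comparison; the sort is expressed with PySem.List.insertBy,
-- the stable-insertion primitive.
def pyLtList : List Int → List Int → Bool
  | [], [] => false
  | [], _ :: _ => true
  | _ :: _, [] => false
  | a :: as, b :: bs => if a < b then true else if b < a then false else pyLtList as bs

def pyLtPair (x y : Int × List Int) : Bool :=
  if x.1 < y.1 then true else if y.1 < x.1 then false else pyLtList x.2 y.2

-- find_prev_shortest_path: the indices are A's loop counters (nonnegative, in range under
-- Pre_), kept as Nat; out-of-range reads (unreachable under Pre_) take the getD default.
def find_prev_shortest_path (board : List (List Int))
    (prev : List (List (Int × List Int))) (r c : Nat) : List Int × Int :=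
  let prevCol := c - 1
  let upRow := if r > 0 then r - 1 else board.length - 1
  let midRow := r
  let downRow := (r + 1) % board.length
  let upCost := ((prev.getD upRow []).getD prevCol (0, [])).1
  let midCost := ((prev.getD midRow []).getD prevCol (0, [])).1
  let downCost := ((prev.getD downRow []).getD prevCol (0, [])).1
  let pairs := [(upCost, ((prev.getD upRow []).getD prevCol (0, [])).2 ++ [(r : Int)]),
                (midCost, ((prev.getD midRow []).getD prevCol (0, [])).2 ++ [(r : Int)]),
                (downCost, ((prev.getD downRow []).getD prevCol (0, [])).2 ++ [(r : Int)])]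
  -- row_cost_pairs.sort(): stable ascending insertion sort with the Python comparator
  let sortedPairs := pairs.foldl (fun acc v => PySem.List.insertBy pyLtPair v acc) []
  ((sortedPairs.getD 0 (0, [])).2, (sortedPairs.getD 0 (0, [])).1)

def search_shortest_path (board : List (List Int)) : List Int × Int :=
  let rowSize := board.length
  let colSize := (board.getD 0 []).length
  let accCosts := board   -- board[:] (shallow copy; board itself is never written)
  let accPaths := (List.range rowSize).map (fun (r : Nat) => (List.range colSize).map (fun _ => [(r : Int)]))
  let avInit := (List.range rowSize).map (fun r =>
    (List.range colSize).map (fun c => ((accCosts.getD r []).getD c 0, (accPaths.getD r []).getD c [])))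
  -- the two in-place assignments (PATH, then COST := shortest + old COST) as one nested set
  let avFinal := (List.range' 1 (colSize - 1)).foldl (fun av c =>
    (List.range rowSize).foldl (fun av r =>
      let sp := (find_prev_shortest_path board av r c).1
      let sc := (find_prev_shortest_path board av r c).2
      let row := av.getD r []
      av.set r (row.set c (sc + (row.getD c (0, [])).1, sp))) av) avInit
  let lastValues := avFinal.map (fun vals =>
    let last := PySem.List.pyGetD vals (-1) (0, []); (last.1, last.2))
  let sortedLast := lastValues.foldl (fun acc v => PySem.List.insertBy pyLtPair v acc) []
  ((sortedLast.getD 0 (0, [])).2, (sortedLast.getD 0 (0, [])).1)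

-- ===== PORT B =====
-- loop bodies of Source B as named helpers (same loops, same state)
def altBody (board : List (List Int)) (suf : List (List Int)) (k : Nat) : List (List Int) :=
  let n := board.length
  let m := (board.getD 0 []).length
  let c := m - 2 - k
  let nxt := suf.headD []
  ((List.range n).map (fun (r : Nat) =>
    let upI := (PySem.Int.mod ((r : Int) - 1) (n : Int)).toNat   -- (r-1) % n, Python mod
    let dnI := (PySem.Int.mod ((r : Int) + 1) (n : Int)).toNat   -- (r+1) % n
    (board.getD r []).getD c 0 +
      min (min (nxt.getD upI 0) (nxt.getD r 0)) (nxt.getD dnI 0))) :: suf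

def altStep (board : List (List Int)) (suffix : List (List Int))
    (st : List Int × Nat) (c : Nat) : List Int × Nat :=
  let n := board.length
  let r := st.2
  let need := (suffix.getD (c - 1) []).getD r 0 - (board.getD r []).getD (c - 1) 0
  let upI := (PySem.Int.mod ((r : Int) - 1) (n : Int)).toNat
  let dnI := (PySem.Int.mod ((r : Int) + 1) (n : Int)).toNat
  let cands := ([upI, r, dnI]).filter (fun u => (suffix.getD c []).getD u 0 == need)
  let r' := cands.tail.foldl min (cands.headD 0)   -- min(qualifying row indices)
  (st.1 ++ [(r' : Int)], r')

def search_shortest_path_alt (board : List (List Int)) : List Int × Int :=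
  let n := board.length
  let m := (board.getD 0 []).length
  -- backward DP table, built back to front (suffix.getD c = Python suffix[c])
  let lastCol := (List.range n).map (fun r => (board.getD r []).getD (m - 1) 0)
  let suffix := (List.range (m - 1)).foldl (altBody board) [lastCol]
  let col0 := suffix.headD []
  -- min(range(n), key=...): first index with minimal suffix[0][r]
  let start := ((List.range n).tail).foldl
    (fun best r => if col0.getD r 0 < col0.getD best 0 then r else best) 0
  -- greedy reconstruction of the lexicographically smallest optimal path
  let fin := (List.range' 1 (m - 1)).foldl (altStep board suffix) ([(start : Int)], start)
  (fin.1, col0.getD start 0)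

-- ===== PRECONDITION & SPEC =====
-- Pre_: exactly the inputs Python A returns on — a nonempty board whose first row is
-- nonempty and with no row shorter than the first (otherwise A raises IndexError).
def Pre_search_shortest_path (board : List (List Int)) : Prop :=
  board ≠ [] ∧ 0 < (board.headD []).length ∧
    ∀ row ∈ board, (board.headD []).length ≤ row.length

instance (board : List (List Int)) : Decidable (Pre_search_shortest_path board) := by
  unfold Pre_search_shortest_path; infer_instance

def pvWitness_search_shortest_path : List (List Int) := [[1, 2, 3], [4, 5, 6]]

def Spec_search_shortest_path (board : List (List Int)) (out : List Int × Int) : Prop :=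
  out = search_shortest_path_alt board
instance (board : List (List Int)) (out : List Int × Int) :
    Decidable (Spec_search_shortest_path board out) := by
  unfold Spec_search_shortest_path; infer_instance

-- ===== CLAIM (what is proved, stated in full; the proofs are below) =====
def Claim_equal_search_shortest_path : Prop :=
  ∀ (board : List (List Int)), Dom_search_shortest_path board →
    Pre_search_shortest_path board →
    Spec_search_shortest_path board (search_shortest_path board)

-- ===== LEMMAS AND PROOFS =====

-- ---------- A-side machinery: the forward DP A's table computes ----------
-- first minimal element of three (what A's 3-element sort's head is)
def pvMin3 (x y z : Int × List Int) : Int × List Int :=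
  if pyLtPair z (if pyLtPair y x then y else x) then z
  else if pyLtPair y x then y else x

def pvCell (board : List (List Int)) (st : List (Int × List Int)) (c r : Nat) :
    Int × List Int :=
  let b := pvMin3 (st.getD (if r > 0 then r - 1 else board.length - 1) (0, []))
                  (st.getD r (0, [])) (st.getD ((r + 1) % board.length) (0, []))
  (b.1 + (board.getD r []).getD c 0, b.2 ++ [(r : Int)])

def pvStep (board : List (List Int)) (st : List (Int × List Int)) (c : Nat) :
    List (Int × List Int) :=
  (List.range board.length).map (pvCell board st c)

def pvInitState (board : List (List Int)) : List (Int × List Int) :=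
  (List.range board.length).map (fun r => ((board.getD r []).getD 0 0, [(r : Int)]))

def pvState (board : List (List Int)) (c : Nat) : List (Int × List Int) :=
  (List.range' 1 c).foldl (pvStep board) (pvInitState board)

def pvColAt (av : List (List (Int × List Int))) (k : Nat) : List (Int × List Int) :=
  av.map (fun row => row.getD k (0, []))

def pvInitCol (board : List (List Int)) (k : Nat) : List (Int × List Int) :=
  (List.range board.length).map (fun r => ((board.getD r []).getD k 0, [(r : Int)]))

-- the running first-minimum both ports end with
def pvRunMin (st : List (Int × List Int)) : Int × List Int :=
  st.tail.foldl (fun acc x => if pyLtPair x acc then x else acc) (st.getD 0 (0, []))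

def pvAnswer (board : List (List Int)) : List Int × Int :=
  let best := pvRunMin (pvState board ((board.getD 0 []).length - 1))
  (best.2, best.1)

lemma pvState_zero (board : List (List Int)) : pvState board 0 = pvInitState board := rfl

lemma pvState_succ (board : List (List Int)) (c : Nat) :
    pvState board (c + 1) = pvStep board (pvState board c) (c + 1) := by
  unfold pvState
  rw [List.range'_concat, List.foldl_append]
  simp only [Nat.one_mul, List.foldl_cons, List.foldl_nil]
  rw [Nat.add_comm]

lemma pvStep_length (board : List (List Int)) (st : List (Int × List Int)) (c : Nat) :
    (pvStep board st c).length = board.length := by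
  simp [pvStep]

lemma pvState_length (board : List (List Int)) (c : Nat) :
    (pvState board c).length = board.length := by
  induction c with
  | zero => simp [pvState_zero, pvInitState]
  | succ c ih => rw [pvState_succ, pvStep_length]

lemma pvMin3_mem (x y z : Int × List Int) :
    pvMin3 x y z = x ∨ pvMin3 x y z = y ∨ pvMin3 x y z = z := by
  unfold pvMin3; split_ifs <;> tauto

lemma getD_map_range' {α : Type} (f : Nat → α) (n k : Nat) (d : α) (hk : k < n) :
    ((List.range n).map f).getD k d = f k := by
  rw [List.getD_eq_getElem _ _ (by simpa using hk)]
  simp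

lemma pvStep_getD (board : List (List Int)) (st : List (Int × List Int)) (c r : Nat)
    (hr : r < board.length) :
    (pvStep board st c).getD r (0, []) = pvCell board st c r := by
  unfold pvStep; exact getD_map_range' _ _ _ _ hr

lemma pvState_path_length (board : List (List Int)) (c : Nat) (r : Nat)
    (hr : r < board.length) :
    ((pvState board c).getD r (0, [])).2.length = c + 1 := by
  induction c generalizing r with
  | zero =>
      rw [pvState_zero]
      unfold pvInitState
      rw [getD_map_range' _ _ _ _ hr]
      simp
  | succ c ih =>
      rw [pvState_succ, pvStep_getD _ _ _ _ hr]
      unfold pvCell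
      have hn : 0 < board.length := by omega
      rcases pvMin3_mem
          ((pvState board c).getD (if r > 0 then r - 1 else board.length - 1) (0, []))
          ((pvState board c).getD r (0, []))
          ((pvState board c).getD ((r + 1) % board.length) (0, []))
        with h | h | h <;> simp only [h] <;> rw [List.length_append]
      · rw [ih _ (by split <;> omega)]; simp
      · rw [ih _ hr]; simp
      · rw [ih _ (Nat.mod_lt _ hn)]; simp

-- head of a stable insertion sort = the running first-minimum
lemma insertBy_cons (b : (Int × List Int) → (Int × List Int) → Bool) (x h : Int × List Int)
    (t : List (Int × List Int)) :
    PySem.List.insertBy b x (h :: t) =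
      if b x h then x :: h :: t else h :: PySem.List.insertBy b x t := rfl

lemma foldl_insertBy_head (l : List (Int × List Int)) :
    ∀ (h : Int × List Int) (t : List (Int × List Int)) (d : Int × List Int),
    ((l.foldl (fun acc v => PySem.List.insertBy pyLtPair v acc) (h :: t)).getD 0 d) =
      l.foldl (fun acc x => if pyLtPair x acc then x else acc) h := by
  induction l with
  | nil => intro h t d; rfl
  | cons x rest ih =>
      intro h t d
      simp only [List.foldl_cons, insertBy_cons]
      by_cases hb : pyLtPair x h
      · simp only [hb, if_true]; exact ih x (h :: t) d
      · simp only [hb]; exact ih h _ d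

lemma sort3_head (p0 p1 p2 d : Int × List Int) :
    (([p0, p1, p2].foldl (fun acc v => PySem.List.insertBy pyLtPair v acc) []).getD 0 d) =
      pvMin3 p0 p1 p2 := by
  show (([p1, p2].foldl (fun acc v => PySem.List.insertBy pyLtPair v acc) [p0]).getD 0 d) = _
  rw [foldl_insertBy_head [p1, p2] p0 [] d]
  simp only [List.foldl_cons, List.foldl_nil, pvMin3]

lemma foldl_insertBy_head' (l : List (Int × List Int)) (hne : l ≠ []) (d : Int × List Int) :
    ((l.foldl (fun acc v => PySem.List.insertBy pyLtPair v acc) []).getD 0 d) = pvRunMin l := by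
  cases l with
  | nil => exact absurd rfl hne
  | cons h t =>
      simp only [List.foldl_cons]
      rw [show PySem.List.insertBy pyLtPair h [] = [h] from rfl, foldl_insertBy_head t h [] d]
      unfold pvRunMin
      simp

-- appending the same element to same-length paths does not change the comparison
lemma pyLtList_append (t : Int) :
    ∀ (p q : List Int), p.length = q.length →
      pyLtList (p ++ [t]) (q ++ [t]) = pyLtList p q := by
  intro p
  induction p with
  | nil =>
      intro q hq
      rw [List.length_nil] at hq
      obtain rfl : q = [] := List.eq_nil_of_length_eq_zero hq.symm
      simp [pyLtList]
  | cons a as ih =>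
      intro q hq
      cases q with
      | nil => simp at hq
      | cons b bs =>
          simp only [List.cons_append, pyLtList]
          rw [ih bs (by simpa using hq)]

lemma pyLtPair_append (t : Int) (x y : Int × List Int) (hxy : x.2.length = y.2.length) :
    pyLtPair (x.1, x.2 ++ [t]) (y.1, y.2 ++ [t]) = pyLtPair x y := by
  unfold pyLtPair
  simp only
  rw [pyLtList_append t x.2 y.2 hxy]

lemma pvMin3_append (t : Int) (x y z : Int × List Int)
    (hxy : x.2.length = y.2.length) (hxz : x.2.length = z.2.length) :
    pvMin3 (x.1, x.2 ++ [t]) (y.1, y.2 ++ [t]) (z.1, z.2 ++ [t]) =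
      ((pvMin3 x y z).1, (pvMin3 x y z).2 ++ [t]) := by
  unfold pvMin3
  rw [pyLtPair_append t y x hxy.symm]
  by_cases h1 : pyLtPair y x
  · simp only [h1, if_true]
    rw [pyLtPair_append t z y (hxz.symm.trans hxy)]
    by_cases h2 : pyLtPair z y <;> simp [h2]
  · simp only [h1, Bool.false_eq_true, if_false]
    rw [pyLtPair_append t z x hxz.symm]
    by_cases h2 : pyLtPair z x <;> simp [h2]

-- getD facts for set used by the table invariant
lemma getD_set_self {α : Type} (l : List α) (k : Nat) (v d : α) (hk : k < l.length) :
    (l.set k v).getD k d = v := by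
  rw [List.getD_eq_getElem _ _ (by simpa using hk)]
  simp

lemma getD_set_ne {α : Type} (l : List α) (i k : Nat) (v d : α) (hik : i ≠ k) :
    (l.set k v).getD i d = l.getD i d := by
  by_cases hi : i < l.length
  · rw [List.getD_eq_getElem _ _ (by simpa using hi), List.getD_eq_getElem _ _ hi]
    exact List.getElem_set_ne (by omega) _
  · rw [List.getD_eq_default _ _ (by simpa using hi),
        List.getD_eq_default _ _ (by omega)]

lemma pvColAt_getD (av : List (List (Int × List Int))) (k i : Nat) (d : Int × List Int)
    (hi : i < av.length) :
    (pvColAt av k).getD i d = (av.getD i []).getD k (0, []) := by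
  unfold pvColAt
  rw [List.getD_eq_getElem _ _ (by simpa using hi), List.getD_eq_getElem _ _ hi]
  simp

-- writing one cell of column c leaves every other column unchanged
lemma pvColAt_set (av : List (List (Int × List Int))) (k c j : Nat)
    (v : Int × List Int) (hjc : j ≠ c) :
    pvColAt (av.set k ((av.getD k []).set c v)) j = pvColAt av j := by
  unfold pvColAt
  rw [List.map_set]
  rw [getD_set_ne _ _ _ _ _ hjc]
  apply List.ext_getElem (by simp)
  intro i h1 h2
  by_cases hik : k = i
  · subst hik
    have hk : k < av.length := by simpa using h2
    simp [List.getD, List.getElem?_eq_getElem hk]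
  · simp [List.getElem_set_ne hik]

-- one write of A's inner loop (textually the body of the port's inner fold)
def pvABody (board : List (List Int)) (c : Nat)
    (av : List (List (Int × List Int))) (r : Nat) : List (List (Int × List Int)) :=
  let sp := (find_prev_shortest_path board av r c).1
  let sc := (find_prev_shortest_path board av r c).2
  let row := av.getD r []
  av.set r (row.set c (sc + (row.getD c (0, [])).1, sp))

-- what find_prev_shortest_path returns when column c-1 of the table is the rolling state
lemma find_prev_eq (board : List (List Int)) (av : List (List (Int × List Int)))
    (r c : Nat) (hr : r < board.length) (hc : 1 ≤ c)
    (hlen : av.length = board.length)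
    (hcol : pvColAt av (c - 1) = pvState board (c - 1)) :
    find_prev_shortest_path board av r c =
      (let b := pvMin3
          ((pvState board (c - 1)).getD (if r > 0 then r - 1 else board.length - 1) (0, []))
          ((pvState board (c - 1)).getD r (0, []))
          ((pvState board (c - 1)).getD ((r + 1) % board.length) (0, []));
        (b.2 ++ [(r : Int)], b.1)) := by
  have hn : 0 < board.length := by omega
  have hread : ∀ i, i < board.length →
      (av.getD i []).getD (c - 1) (0, []) = (pvState board (c - 1)).getD i (0, []) := by
    intro i hi
    rw [← pvColAt_getD av (c - 1) i (0, []) (by omega), hcol]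
  have hup : (if r > 0 then r - 1 else board.length - 1) < board.length := by
    split <;> omega
  have hdown : (r + 1) % board.length < board.length := Nat.mod_lt _ hn
  unfold find_prev_shortest_path
  simp only [hread _ hup, hread _ hr, hread _ hdown]
  rw [sort3_head]
  set st := pvState board (c - 1) with hst
  have hL : ∀ i, i < board.length → (st.getD i (0, [])).2.length = (c - 1) + 1 := by
    intro i hi; exact pvState_path_length board (c - 1) i hi
  have := pvMin3_append (r : Int)
      (st.getD (if r > 0 then r - 1 else board.length - 1) (0, []))
      (st.getD r (0, [])) (st.getD ((r + 1) % board.length) (0, []))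
      (by rw [hL _ hup, hL _ hr]) (by rw [hL _ hup, hL _ hdown])
  rw [this]

-- the inner-loop invariant: after the rows < k of column c have been written
def pvInnerInv (board : List (List Int)) (c k : Nat)
    (av : List (List (Int × List Int))) : Prop :=
  av.length = board.length ∧
  (∀ r < board.length, (av.getD r []).length = (board.getD 0 []).length) ∧
  pvColAt av (c - 1) = pvState board (c - 1) ∧
  (∀ j, c < j → j < (board.getD 0 []).length → pvColAt av j = pvInitCol board j) ∧
  (∀ r < board.length, (av.getD r []).getD c (0, []) =
      if r < k then pvCell board (pvState board (c - 1)) c r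
      else ((board.getD r []).getD c 0, [(r : Int)]))

lemma pvABody_preserves (board : List (List Int)) (c k : Nat)
    (hc : 1 ≤ c) (_hcm : c < (board.getD 0 []).length) (hk : k < board.length)
    (av : List (List (Int × List Int))) (hinv : pvInnerInv board c k av) :
    pvInnerInv board c (k + 1) (pvABody board c av k) := by
  obtain ⟨hlen, hrowlen, hcol, hinit, hcolc⟩ := hinv
  have hval : pvABody board c av k =
      av.set k ((av.getD k []).set c (pvCell board (pvState board (c - 1)) c k)) := by
    unfold pvABody
    rw [find_prev_eq board av k c hk hc hlen hcol]
    simp only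
    rw [hcolc k hk, if_neg (Nat.lt_irrefl k)]
    unfold pvCell
    simp [Int.add_comm]
  rw [hval]
  refine ⟨by simpa using hlen, ?_, ?_, ?_, ?_⟩
  · intro r hr
    by_cases hrk : r = k
    · subst hrk
      rw [getD_set_self _ _ _ _ (by omega)]
      rw [List.length_set]
      exact hrowlen r hr
    · rw [getD_set_ne _ _ _ _ _ hrk]
      exact hrowlen r hr
  · rw [pvColAt_set _ _ _ _ _ (by omega)]
    exact hcol
  · intro j hj hjm
    rw [pvColAt_set _ _ _ _ _ (by omega)]
    exact hinit j hj hjm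
  · intro r hr
    by_cases hrk : r = k
    · subst hrk
      rw [getD_set_self _ _ _ _ (by omega)]
      rw [getD_set_self _ _ _ _ (by rw [hrowlen r hr]; omega)]
      rw [if_pos (Nat.lt_succ_self _)]
    · rw [getD_set_ne _ _ _ _ _ hrk]
      rw [hcolc r hr]
      by_cases h1 : r < k
      · rw [if_pos h1, if_pos (by omega)]
      · rw [if_neg h1, if_neg (by omega)]

lemma pvA_inner (board : List (List Int)) (c : Nat)
    (hc : 1 ≤ c) (hcm : c < (board.getD 0 []).length) :
    ∀ (j k : Nat), k + j ≤ board.length → ∀ av, pvInnerInv board c k av →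
      pvInnerInv board c (k + j) ((List.range' k j).foldl (pvABody board c) av) := by
  intro j
  induction j with
  | zero => intro k _ av hinv; simpa using hinv
  | succ j ih =>
      intro k hkj av hinv
      rw [List.range'_succ]
      simp only [List.foldl_cons]
      have h1 := pvABody_preserves board c k hc hcm (by omega) av hinv
      have h2 := ih (k + 1) (by omega) _ h1
      simpa [Nat.add_assoc, Nat.add_comm 1 j] using h2

-- the full table invariant after processing columns 1..c
def pvInv (board : List (List Int)) (c : Nat) (av : List (List (Int × List Int))) : Prop :=
  av.length = board.length ∧
  (∀ r < board.length, (av.getD r []).length = (board.getD 0 []).length) ∧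
  pvColAt av c = pvState board c ∧
  (∀ j, c < j → j < (board.getD 0 []).length → pvColAt av j = pvInitCol board j)

lemma pvColAt_eq_of_cells (board : List (List Int))
    (av : List (List (Int × List Int))) (k : Nat)
    (hlen : av.length = board.length)
    (h : ∀ r < board.length, (av.getD r []).getD k (0, []) =
        (pvState board k).getD r (0, [])) :
    pvColAt av k = pvState board k := by
  apply List.ext_getElem
  · unfold pvColAt
    rw [List.length_map, hlen, pvState_length]
  · intro i h1 h2
    have hi : i < board.length := by
      unfold pvColAt at h1; rw [List.length_map, hlen] at h1; exact h1
    have e1 : (pvColAt av k)[i] = (pvColAt av k).getD i (0, []) := by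
      rw [List.getD_eq_getElem _ _ h1]
    have e2 : (pvState board k)[i] = (pvState board k).getD i (0, []) := by
      rw [List.getD_eq_getElem _ _ h2]
    rw [e1, e2, pvColAt_getD _ _ _ _ (by omega), h i hi]

lemma pvInv_step (board : List (List Int)) (c : Nat)
    (hc : 1 ≤ c) (hcm : c < (board.getD 0 []).length)
    (av : List (List (Int × List Int))) (hinv : pvInv board (c - 1) av) :
    pvInv board c ((List.range board.length).foldl (pvABody board c) av) := by
  obtain ⟨hlen, hrowlen, hcol, hinit⟩ := hinv
  have hstart : pvInnerInv board c 0 av := by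
    refine ⟨hlen, hrowlen, hcol, ?_, ?_⟩
    · intro j hj hjm; exact hinit j (by omega) hjm
    · intro r hr
      rw [if_neg (by omega)]
      rw [← pvColAt_getD av c r (0, []) (by omega), hinit c (by omega) hcm]
      unfold pvInitCol
      rw [getD_map_range' _ _ _ _ hr]
  have h := pvA_inner board c hc hcm board.length 0 (by omega) av hstart
  simp only [Nat.zero_add] at h
  rw [List.range_eq_range']
  obtain ⟨hlen', hrowlen', hcol', hinit', hcolc'⟩ := h
  refine ⟨hlen', hrowlen', ?_, hinit'⟩
  apply pvColAt_eq_of_cells board _ c hlen'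
  intro r hr
  rw [hcolc' r hr]
  simp only [hr, if_true]
  have : c = (c - 1) + 1 := by omega
  rw [this, pvState_succ, pvStep_getD _ _ _ _ hr]
  congr 1 <;> omega

def pvAvInit (board : List (List Int)) : List (List (Int × List Int)) :=
  (List.range board.length).map (fun r =>
    (List.range (board.getD 0 []).length).map (fun c => ((board.getD r []).getD c 0,
      (((List.range board.length).map (fun (r' : Nat) => (List.range (board.getD 0 []).length).map
        (fun _ => [(r' : Int)]))).getD r []).getD c [])))

lemma pvAvInit_cell (board : List (List Int)) (r c : Nat)
    (hr : r < board.length) (hc : c < (board.getD 0 []).length) :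
    ((pvAvInit board).getD r []).getD c (0, []) =
      ((board.getD r []).getD c 0, [(r : Int)]) := by
  unfold pvAvInit
  rw [getD_map_range' _ _ _ _ hr, getD_map_range' _ _ _ _ hc,
      getD_map_range' _ _ _ _ hr, getD_map_range' _ _ _ _ hc]

lemma pvInv_init (board : List (List Int)) (hm : 0 < (board.getD 0 []).length) :
    pvInv board 0 (pvAvInit board) := by
  have hlen : (pvAvInit board).length = board.length := by
    unfold pvAvInit; simp
  have hrowlen : ∀ r < board.length,
      ((pvAvInit board).getD r []).length = (board.getD 0 []).length := by
    intro r hr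
    unfold pvAvInit
    rw [getD_map_range' _ _ _ _ hr]
    simp
  have hcols : ∀ j, j < (board.getD 0 []).length →
      pvColAt (pvAvInit board) j = pvInitCol board j := by
    intro j hj
    apply List.ext_getElem
    · unfold pvColAt pvInitCol
      rw [List.length_map, hlen]
      simp
    · intro i h1 h2
      have hi : i < board.length := by
        unfold pvColAt at h1; rw [List.length_map, hlen] at h1; exact h1
      have e1 : (pvColAt (pvAvInit board) j)[i] =
          (pvColAt (pvAvInit board) j).getD i (0, []) := by
        rw [List.getD_eq_getElem _ _ h1]
      have e2 : (pvInitCol board j)[i] = (pvInitCol board j).getD i (0, []) := by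
        rw [List.getD_eq_getElem _ _ h2]
      rw [e1, e2, pvColAt_getD _ _ _ _ (by omega), pvAvInit_cell board i j hi hj]
      unfold pvInitCol
      rw [getD_map_range' _ _ _ _ hi]
  refine ⟨hlen, hrowlen, ?_, fun j hj hjm => hcols j hjm⟩
  rw [hcols 0 hm, pvState_zero]
  rfl

lemma pvInv_outer (board : List (List Int)) (hm : 0 < (board.getD 0 []).length) :
    ∀ c, c < (board.getD 0 []).length →
      pvInv board c ((List.range' 1 c).foldl
        (fun av col => (List.range board.length).foldl (pvABody board col) av)
        (pvAvInit board)) := by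
  intro c
  induction c with
  | zero => intro _; exact pvInv_init board hm
  | succ c ih =>
      intro hcm
      rw [List.range'_concat, List.foldl_append]
      simp only [List.foldl_cons, List.foldl_nil]
      have h := pvInv_step board (c + 1) (by omega) hcm _
        (by simpa using ih (by omega))
      have : 1 + 1 * c = c + 1 := by omega
      rw [this]
      exact h

-- ===== port A evaluates to pvAnswer =====
lemma portA_eq (board : List (List Int)) (hn : 0 < board.length)
    (hm : 0 < (board.getD 0 []).length) :
    search_shortest_path board = pvAnswer board := by
  have hinv := pvInv_outer board hm ((board.getD 0 []).length - 1) (by omega)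
  obtain ⟨hlen, hrowlen, hcol, _⟩ := hinv
  unfold search_shortest_path
  simp only
  set m := (board.getD 0 []).length with hmdef
  set avFinal := (List.range' 1 (m - 1)).foldl
    (fun av col => (List.range board.length).foldl (pvABody board col) av)
    (pvAvInit board) with havF
  have hbody : (List.range' 1 (m - 1)).foldl (fun av c =>
      (List.range board.length).foldl (fun av r =>
        let sp := (find_prev_shortest_path board av r c).1
        let sc := (find_prev_shortest_path board av r c).2
        let row := av.getD r []
        av.set r (row.set c (sc + (row.getD c (0, [])).1, sp))) av)
      ((List.range board.length).map (fun r =>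
        (List.range m).map (fun c => ((board.getD r []).getD c 0,
          (((List.range board.length).map (fun (r' : Nat) => (List.range m).map
            (fun _ => [(r' : Int)]))).getD r []).getD c [])))) = avFinal := rfl
  rw [hbody]
  have hlast : avFinal.map (fun vals =>
      let last := PySem.List.pyGetD vals (-1) (0, []); (last.1, last.2)) =
      pvState board (m - 1) := by
    rw [← hcol]
    unfold pvColAt
    apply List.ext_getElem
    · simp
    · intro i h1 h2
      have hi : i < board.length := by rw [List.length_map] at h1; omega
      simp only [List.getElem_map]
      have hrl : avFinal[i].length = m := by
        have := hrowlen i hi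
        rw [List.getD_eq_getElem _ _ (by omega : i < avFinal.length)] at this
        exact this
      have hne : avFinal[i] ≠ [] := by
        intro h; rw [h] at hrl; simp at hrl; omega
      rw [PySem.List.pyGetD_neg_one _ _ hne]
      rw [List.getLast_eq_getElem]
      rw [List.getD_eq_getElem _ _ (by omega : m - 1 < avFinal[i].length)]
      simp [hrl]
  rw [hlast]
  have hne : pvState board (m - 1) ≠ [] := by
    intro h
    have hl := pvState_length board (m - 1)
    rw [h] at hl
    simp at hl
    omega
  rw [foldl_insertBy_head' _ hne]
  rfl

-- ---------- order lemmas: pyLtPair is a strict total order ----------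
lemma pyLtList_irrefl (p : List Int) : pyLtList p p = false := by
  induction p with
  | nil => rfl
  | cons a t ih => simp [pyLtList, ih]

lemma pyLtPair_irrefl (x : Int × List Int) : pyLtPair x x = false := by
  simp [pyLtPair, pyLtList_irrefl]

lemma pyLtList_trans : ∀ (p q s : List Int),
    pyLtList p q = true → pyLtList q s = true → pyLtList p s = true := by
  intro p
  induction p with
  | nil =>
      intro q s h1 h2
      cases q with
      | nil => exact h2
      | cons b bs => cases s with
        | nil => simp [pyLtList] at h2
        | cons c cs => rfl
  | cons a as ih =>
      intro q s h1 h2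
      cases q with
      | nil => simp [pyLtList] at h1
      | cons b bs =>
          cases s with
          | nil => simp [pyLtList] at h2
          | cons c cs =>
              simp only [pyLtList] at h1 h2 ⊢
              by_cases hab : a < b
              · by_cases hbc : b < c
                · simp [show a < c by omega]
                · by_cases hcb : c < b
                  · simp [hbc, hcb] at h2
                  · simp [show a < c by omega]
              · by_cases hba : b < a
                · simp [hab, hba] at h1
                · simp [hab, hba] at h1
                  by_cases hbc : b < c
                  · simp [show a < c by omega]
                  · by_cases hcb : c < b
                    · simp [hbc, hcb] at h2
                    · simp [hbc, hcb] at h2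
                      simp [show ¬ a < c by omega, show ¬ c < a by omega]
                      exact ih bs cs h1 h2

lemma pyLtList_total : ∀ (p q : List Int),
    pyLtList p q = false → pyLtList q p = false → p = q := by
  intro p
  induction p with
  | nil =>
      intro q h1 _
      cases q with
      | nil => rfl
      | cons b bs => simp [pyLtList] at h1
  | cons a as ih =>
      intro q h1 h2
      cases q with
      | nil => simp [pyLtList] at h2
      | cons b bs =>
          simp only [pyLtList] at h1 h2
          by_cases hab : a < b
          · simp [hab] at h1
          · by_cases hba : b < a
            · simp [hba] at h2
            · simp [hab, hba] at h1 h2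
              have : a = b := by omega
              rw [this, ih bs h1 h2]

lemma pyLtPair_trans (x y z : Int × List Int) (h1 : pyLtPair x y = true)
    (h2 : pyLtPair y z = true) : pyLtPair x z = true := by
  unfold pyLtPair at h1 h2 ⊢
  by_cases hxy : x.1 < y.1
  · by_cases hyz : y.1 < z.1
    · simp [show x.1 < z.1 by omega]
    · by_cases hzy : z.1 < y.1
      · simp [hyz, hzy] at h2
      · simp [show x.1 < z.1 by omega]
  · by_cases hyx : y.1 < x.1
    · simp [hxy, hyx] at h1
    · simp [hxy, hyx] at h1
      by_cases hyz : y.1 < z.1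
      · simp [show x.1 < z.1 by omega]
      · by_cases hzy : z.1 < y.1
        · simp [hyz, hzy] at h2
        · simp [hyz, hzy] at h2
          simp [show ¬ x.1 < z.1 by omega, show ¬ z.1 < x.1 by omega]
          exact pyLtList_trans _ _ _ h1 h2

lemma pyLtPair_total (x y : Int × List Int) (h1 : pyLtPair x y = false)
    (h2 : pyLtPair y x = false) : x = y := by
  unfold pyLtPair at h1 h2
  by_cases hxy : x.1 < y.1
  · simp [hxy] at h1
  · by_cases hyx : y.1 < x.1
    · simp [hyx] at h2
    · simp [hxy, hyx] at h1 h2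
      exact Prod.ext (by omega) (pyLtList_total _ _ h1 h2)

-- ¬b<a and ¬c<b give ¬c<a  (transitivity of the non-strict order)
lemma pyLtPair_nle_trans (a b c : Int × List Int) (h1 : pyLtPair b a = false)
    (h2 : pyLtPair c b = false) : pyLtPair c a = false := by
  by_contra h
  have hca : pyLtPair c a = true := by
    cases hx : pyLtPair c a with
    | false => exact absurd hx h
    | true => rfl
  by_cases hab : pyLtPair a b = true
  · have : pyLtPair c b = true := pyLtPair_trans c a b hca hab
    simp [this] at h2
  · have hEq : a = b := pyLtPair_total a b (by simpa using hab) h1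
    subst hEq
    simp [hca] at h2

lemma pyLtPair_false_iff (x y : Int × List Int) :
    pyLtPair x y = false ↔ (y.1 < x.1 ∨ (x.1 = y.1 ∧ pyLtList x.2 y.2 = false)) := by
  unfold pyLtPair
  by_cases h : x.1 < y.1
  · simp [h, show ¬ y.1 < x.1 by omega, show x.1 ≠ y.1 by omega]
  · by_cases h' : y.1 < x.1
    · simp [h, h']
    · simp [show x.1 = y.1 by omega]

-- first-minimum characterisation
def IsMinP (l : List (Int × List Int)) (v : Int × List Int) : Prop :=
  v ∈ l ∧ ∀ x ∈ l, pyLtPair x v = false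

lemma IsMinP_congr {l l' : List (Int × List Int)} {v w : Int × List Int}
    (hv : IsMinP l v) (hw : IsMinP l' w) (h : ∀ x, x ∈ l ↔ x ∈ l') : v = w := by
  refine pyLtPair_total v w ?_ ?_
  · exact hw.2 v ((h v).mp hv.1)
  · exact hv.2 w ((h w).mpr hw.1)

lemma foldlMin_isMin : ∀ (t : List (Int × List Int)) (h : Int × List Int),
    IsMinP (h :: t) (t.foldl (fun acc x => if pyLtPair x acc then x else acc) h) := by
  intro t
  induction t with
  | nil => intro h; exact ⟨List.mem_singleton.mpr rfl, by
      intro x hx; rw [List.mem_singleton] at hx; subst hx; exact pyLtPair_irrefl _⟩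
  | cons y t ih =>
      intro h
      simp only [List.foldl_cons]
      set acc := if pyLtPair y h then y else h with hacc
      obtain ⟨hmem, hlb⟩ := ih acc
      constructor
      · rcases List.mem_cons.mp hmem with h1 | h1
        · rw [h1, hacc]
          split_ifs <;> simp
        · simp [h1]
      · intro x hx
        have hah : pyLtPair h acc = false := by
          rw [hacc]; split_ifs with hy
          · by_contra hc
            simp only [Bool.not_eq_false] at hc
            have := pyLtPair_trans h y h hc (by
              by_contra hc2
              simp only [Bool.not_eq_true] at hc2
              have hEq := pyLtPair_total y h hc2 (by
                by_contra hc3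
                simp only [Bool.not_eq_false] at hc3
                have := pyLtPair_trans y h y hy hc3
                simp [pyLtPair_irrefl] at this)
              simp [hEq, pyLtPair_irrefl] at hy)
            simp [pyLtPair_irrefl] at this
          · exact pyLtPair_irrefl h
        have hay : pyLtPair y acc = false := by
          rw [hacc]; split_ifs with hy
          · exact pyLtPair_irrefl y
          · simpa using hy
        rcases List.mem_cons.mp hx with h1 | h1
        · subst h1
          exact pyLtPair_nle_trans _ acc _ (hlb acc (List.mem_cons_self))
            hah
        · rcases List.mem_cons.mp h1 with h2 | h2
          · subst h2
            exact pyLtPair_nle_trans _ acc _ (hlb acc (List.mem_cons_self)) hay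
          · exact hlb x (List.mem_cons_of_mem _ h2)

lemma pvRunMin_isMin (l : List (Int × List Int)) (hne : l ≠ []) : IsMinP l (pvRunMin l) := by
  cases l with
  | nil => exact absurd rfl hne
  | cons h t =>
      unfold pvRunMin
      simpa using foldlMin_isMin t h

lemma pvMin3_lb (x y z : Int × List Int) :
    pyLtPair x (pvMin3 x y z) = false ∧ pyLtPair y (pvMin3 x y z) = false ∧
      pyLtPair z (pvMin3 x y z) = false := by
  have h := foldlMin_isMin [y, z] x
  simp only [List.foldl_cons, List.foldl_nil] at h
  have he : pvMin3 x y z = [y, z].foldl (fun acc x => if pyLtPair x acc then x else acc) x := by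
    unfold pvMin3
    simp only [List.foldl_cons, List.foldl_nil]
  rw [he]
  obtain ⟨_, hlb⟩ := h
  exact ⟨hlb x (by simp), hlb y (by simp), hlb z (by simp)⟩

-- ---------- grid combinatorics shared by both sides ----------
def bcost (board : List (List Int)) (r c : Nat) : Int := (board.getD r []).getD c 0

def upR (n r : Nat) : Nat := if r > 0 then r - 1 else n - 1
def downR (n r : Nat) : Nat := (r + 1) % n
def nbrs (n r : Nat) : List Nat := [upR n r, r, downR n r]

lemma downR_eq {n r : Nat} (h : r < n) : downR n r = if r + 1 = n then 0 else r + 1 := by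
  unfold downR
  split_ifs with h1
  · rw [h1, Nat.mod_self]
  · exact Nat.mod_eq_of_lt (by omega)

lemma nbrs_lt {n r : Nat} (hn : 0 < n) (hr : r < n) : ∀ u ∈ nbrs n r, u < n := by
  intro u hu
  simp only [nbrs, List.mem_cons, List.not_mem_nil, or_false] at hu
  rcases hu with h | h | h
  · subst h; unfold upR; split <;> omega
  · omega
  · subst h; rw [downR_eq hr]; split <;> omega

lemma nbrs_symm {n r u : Nat} (hn : 0 < n) (hr : r < n) (hu : u < n) :
    u ∈ nbrs n r ↔ r ∈ nbrs n u := by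
  unfold nbrs upR
  rw [downR_eq hr, downR_eq hu]
  simp only [List.mem_cons, List.not_mem_nil, or_false]
  split_ifs <;> omega

-- suffix cost of a path standing at column c
def scost (board : List (List Int)) : Nat → List Nat → Int
  | _, [] => 0
  | c, r :: q => bcost board r c + scost board (c + 1) q

def spairOf (board : List (List Int)) (c : Nat) (q : List Nat) : Int × List Int :=
  (scost board c q, q.map (fun r : Nat => (r : Int)))

-- all paths of length k+1 starting at r (successors appended at the front)
def spaths (n : Nat) : Nat → Nat → List (List Nat)
  | 0, r => [[r]]
  | k + 1, r => (nbrs n r).flatMap (fun u => (spaths n k u).map (fun q => r :: q))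

-- all paths of length c+1 ending at r (predecessors, as A builds them)
def apaths (n : Nat) : Nat → Nat → List (List Nat)
  | 0, r => [[r]]
  | c + 1, r => (nbrs n r).flatMap (fun u => (apaths n c u).map (fun q => q ++ [r]))

def chainN (n : Nat) : List Nat → Prop
  | [] => True
  | [_] => True
  | a :: b :: t => b ∈ nbrs n a ∧ chainN n (b :: t)

def okpath (n len : Nat) (q : List Nat) : Prop :=
  q.length = len ∧ (∀ x ∈ q, x < n) ∧ chainN n q

-- ---------- B-side abstractions: backward DP table and the greedy path ----------
def Gd (board : List (List Int)) (m : Nat) : Nat → Nat → Int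
  | 0, r => bcost board r (m - 1)
  | k + 1, r => bcost board r (m - 1 - (k + 1)) +
      min (min (Gd board m k (upR board.length r)) (Gd board m k r))
          (Gd board m k (downR board.length r))

def natMin (l : List Nat) : Nat := l.tail.foldl min (l.headD 0)

def pick (board : List (List Int)) (m k r : Nat) : Nat :=
  natMin ((nbrs board.length r).filter
    (fun u => Gd board m k u == Gd board m (k + 1) r - bcost board r (m - 1 - (k + 1))))

def gpath (board : List (List Int)) (m : Nat) : Nat → Nat → List Nat
  | 0, r => [r]
  | k + 1, r => r :: gpath board m k (pick board m k r)

def glast (board : List (List Int)) (m : Nat) : Nat → Nat → Nat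
  | 0, r => r
  | k + 1, r => glast board m k (pick board m k r)

-- the common set of candidate pairs both answers are the minimum of
def allA (board : List (List Int)) (m : Nat) : List (Int × List Int) :=
  (List.range board.length).flatMap
    (fun r => (apaths board.length (m - 1) r).map (spairOf board 0))

def allB (board : List (List Int)) (m : Nat) : List (Int × List Int) :=
  (List.range board.length).flatMap
    (fun r => (spaths board.length (m - 1) r).map (spairOf board 0))

-- ---------- path characterisations ----------
lemma apaths_length (n : Nat) : ∀ (c r : Nat) (q : List Nat), q ∈ apaths n c r → q.length = c + 1 := by
  intro c
  induction c with
  | zero => intro r q hq; simp [apaths] at hq; simp [hq]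
  | succ c ih =>
      intro r q hq
      simp only [apaths, List.mem_flatMap, List.mem_map] at hq
      obtain ⟨u, _, p, hp, rfl⟩ := hq
      rw [List.length_append, ih u p hp]
      rfl

lemma spaths_head (n : Nat) : ∀ (k r : Nat) (q : List Nat), q ∈ spaths n k r → q.head? = some r := by
  intro k
  cases k with
  | zero => intro r q hq; simp [spaths] at hq; simp [hq]
  | succ k =>
      intro r q hq
      simp only [spaths, List.mem_flatMap, List.mem_map] at hq
      obtain ⟨u, _, p, _, rfl⟩ := hq
      rfl

lemma chainN_snoc (n : Nat) : ∀ (p : List Nat) (r : Nat), p ≠ [] →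
    (chainN n (p ++ [r]) ↔ chainN n p ∧ ∀ u, p.getLast? = some u → r ∈ nbrs n u) := by
  intro p
  induction p with
  | nil => intro r h; exact absurd rfl h
  | cons a t ih =>
      intro r _
      cases t with
      | nil => simp [chainN]
      | cons b t' =>
          have := ih r (by simp)
          simp only [List.cons_append] at this ⊢
          constructor
          · intro h
            obtain ⟨h1, h2⟩ := h
            obtain ⟨h3, h4⟩ := (this).mp h2
            exact ⟨⟨h1, h3⟩, by
              intro u hu
              apply h4
              simpa using hu⟩
          · intro h
            obtain ⟨⟨h1, h3⟩, h4⟩ := h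
            exact ⟨h1, (this).mpr ⟨h3, by intro u hu; apply h4; simpa using hu⟩⟩

lemma mem_spaths (n : Nat) (hn : 0 < n) : ∀ (k r : Nat), r < n → ∀ q,
    (q ∈ spaths n k r ↔ okpath n (k + 1) q ∧ q.head? = some r) := by
  intro k
  induction k with
  | zero =>
      intro r hr q
      simp only [spaths, List.mem_singleton]
      constructor
      · rintro rfl
        exact ⟨⟨rfl, by simpa using hr, trivial⟩, rfl⟩
      · rintro ⟨⟨hlen, _, _⟩, hhead⟩
        cases q with
        | nil => simp at hhead
        | cons a t =>
            simp only [List.head?] at hhead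
            have : t = [] := by simpa using hlen
            subst this
            simpa using hhead
  | succ k ih =>
      intro r hr q
      simp only [spaths, List.mem_flatMap, List.mem_map]
      constructor
      · rintro ⟨u, hu, p, hp, rfl⟩
        have hun : u < n := nbrs_lt hn hr u hu
        obtain ⟨⟨hlen, hall, hchain⟩, hhead⟩ := (ih u hun p).mp hp
        refine ⟨⟨by simp [hlen], ?_, ?_⟩, rfl⟩
        · intro x hx
          rcases List.mem_cons.mp hx with h | h
          · omega
          · exact hall x h
        · cases p with
          | nil => simp at hhead
          | cons b t =>
              have hb : b = u := by simpa using hhead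
              subst hb
              exact ⟨hu, hchain⟩
      · rintro ⟨⟨hlen, hall, hchain⟩, hhead⟩
        cases q with
        | nil => simp at hhead
        | cons a p =>
            have ha : a = r := by simpa using hhead
            subst ha
            cases p with
            | nil => simp at hlen
            | cons b t =>
                obtain ⟨hb, hchain'⟩ := hchain
                refine ⟨b, hb, b :: t, ?_, rfl⟩
                apply (ih b (nbrs_lt hn hr b hb) (b :: t)).mpr
                refine ⟨⟨by simpa using hlen, ?_, hchain'⟩, rfl⟩
                intro x hx
                exact hall x (List.mem_cons_of_mem _ hx)

lemma mem_apaths (n : Nat) (hn : 0 < n) : ∀ (c r : Nat), r < n → ∀ q,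
    (q ∈ apaths n c r ↔ okpath n (c + 1) q ∧ q.getLast? = some r) := by
  intro c
  induction c with
  | zero =>
      intro r hr q
      simp only [apaths, List.mem_singleton]
      constructor
      · rintro rfl
        exact ⟨⟨rfl, by simpa using hr, trivial⟩, rfl⟩
      · rintro ⟨⟨hlen, _, _⟩, hlast⟩
        cases q with
        | nil => simp at hlast
        | cons a t =>
            have : t = [] := by simpa using hlen
            subst this
            simpa using hlast
  | succ c ih =>
      intro r hr q
      simp only [apaths, List.mem_flatMap, List.mem_map]
      constructor
      · rintro ⟨u, hu, p, hp, rfl⟩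
        have hun : u < n := nbrs_lt hn hr u hu
        obtain ⟨⟨hlen, hall, hchain⟩, hlast⟩ := (ih u hun p).mp hp
        have hpne : p ≠ [] := by intro h; rw [h] at hlen; simp at hlen
        refine ⟨⟨by simp [hlen], ?_, ?_⟩, by simp⟩
        · intro x hx
          rcases List.mem_append.mp hx with h | h
          · exact hall x h
          · simp at h; omega
        · rw [chainN_snoc n p r hpne]
          refine ⟨hchain, ?_⟩
          intro v hv
          rw [hlast] at hv
          injection hv with hv
          subst hv
          exact (nbrs_symm hn hr hun).mp hu
      · rintro ⟨⟨hlen, hall, hchain⟩, hlast⟩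
        have hqne : q ≠ [] := by intro h; rw [h] at hlen; simp at hlen
        obtain ⟨p, rfl⟩ : ∃ p, q = p ++ [r] := List.getLast?_eq_some_iff.mp hlast
        have hpne : p ≠ [] := by
          intro h; subst h; simp at hlen
        obtain ⟨hchain', hnb⟩ := (chainN_snoc n p r hpne).mp hchain
        have hlastp : ∃ u, p.getLast? = some u := by
          cases hp : p.getLast? with
          | none => rw [List.getLast?_eq_none_iff] at hp; exact absurd hp hpne
          | some u => exact ⟨u, rfl⟩
        obtain ⟨u, hu⟩ := hlastp
        have hun : u < n := by
          apply hall
          apply List.mem_append_left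
          exact List.mem_of_getLast? hu
        refine ⟨u, (nbrs_symm hn hun hr).mp (hnb u hu), p, ?_, rfl⟩
        apply (ih u hun p).mpr
        refine ⟨⟨by simp at hlen; omega, ?_, hchain'⟩, hu⟩
        intro x hx
        exact hall x (List.mem_append_left _ hx)

-- ---------- small order/arith helpers ----------
lemma pyLtList_cons_same (a : Int) (p q : List Int) :
    pyLtList (a :: p) (a :: q) = pyLtList p q := by
  simp [pyLtList]

lemma pyLtPair_shift (k t : Int) (x y : Int × List Int) (h : x.2.length = y.2.length) :
    pyLtPair (x.1 + k, x.2 ++ [t]) (y.1 + k, y.2 ++ [t]) = pyLtPair x y := by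
  unfold pyLtPair
  simp only
  rw [pyLtList_append t x.2 y.2 h]
  by_cases h1 : x.1 < y.1
  · simp [h1, show x.1 + k < y.1 + k by omega]
  · by_cases h2 : y.1 < x.1
    · simp [h1, h2, show ¬ x.1 + k < y.1 + k by omega, show y.1 + k < x.1 + k by omega]
    · simp [h1, h2, show ¬ x.1 + k < y.1 + k by omega, show ¬ y.1 + k < x.1 + k by omega]

lemma foldlNatMin_mem : ∀ (t : List Nat) (h : Nat), t.foldl min h = h ∨ t.foldl min h ∈ t := by
  intro t
  induction t with
  | nil => intro h; left; rfl
  | cons y t ih =>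
      intro h
      simp only [List.foldl_cons]
      rcases ih (min h y) with h1 | h1
      · rw [h1]
        rcases Nat.le_total h y with hc | hc
        · left; exact Nat.min_eq_left hc
        · right; rw [Nat.min_eq_right hc]; exact List.mem_cons_self
      · right; exact List.mem_cons_of_mem _ h1

lemma foldlNatMin_le : ∀ (t : List Nat) (h x : Nat), (x = h ∨ x ∈ t) → t.foldl min h ≤ x := by
  intro t
  induction t with
  | nil =>
      intro h x hx
      rcases hx with rfl | hx
      · exact Nat.le_refl _
      · simp at hx
  | cons y t ih =>
      intro h x hx
      simp only [List.foldl_cons]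
      have hstep : t.foldl min (min h y) ≤ min h y := ih (min h y) (min h y) (Or.inl rfl)
      rcases hx with rfl | hx
      · exact le_trans hstep (Nat.min_le_left _ _)
      · rcases List.mem_cons.mp hx with hxy | hx
        · subst hxy
          exact le_trans hstep (Nat.min_le_right _ _)
        · exact ih (min h y) x (Or.inr hx)

lemma natMin_mem (l : List Nat) (hne : l ≠ []) : natMin l ∈ l := by
  cases l with
  | nil => exact absurd rfl hne
  | cons h t =>
      unfold natMin
      rcases foldlNatMin_mem t h with h1 | h1
      · simp [h1]
      · simp [List.mem_cons_of_mem _ h1]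

lemma natMin_le (l : List Nat) (x : Nat) (hx : x ∈ l) : natMin l ≤ x := by
  cases l with
  | nil => simp at hx
  | cons h t =>
      unfold natMin
      rcases List.mem_cons.mp hx with rfl | hx
      · exact foldlNatMin_le t x x (Or.inl rfl)
      · exact foldlNatMin_le t h x (Or.inr hx)

lemma mod_up (n r : Nat) (hn : 0 < n) (hr : r < n) :
    (PySem.Int.mod ((r : Int) - 1) (n : Int)).toNat = upR n r := by
  rw [PySem.Int.mod_eq_emod_of_pos (by exact_mod_cast hn)]
  by_cases h0 : r = 0
  · subst h0
    simp only [Nat.cast_zero]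
    have e : ((0 : Int) - 1) % (n : Int) = (n : Int) - 1 := by
      have h1 := Int.add_mul_emod_self_left (a := (-1 : Int)) (b := (n : Int)) (c := 1)
      have h2 : ((n : Int) - 1) % (n : Int) = (n : Int) - 1 :=
        Int.emod_eq_of_lt (by omega) (by omega)
      have h3 : (-1 : Int) + (n : Int) * 1 = (n : Int) - 1 := by ring
      rw [h3] at h1
      have : ((0 : Int) - 1) = (-1 : Int) := by ring
      rw [this, ← h1, h2]
    rw [e]
    unfold upR
    simp only [gt_iff_lt, Nat.lt_irrefl, if_false]
    omega
  · have e : ((r : Int) - 1) % (n : Int) = ((r - 1 : Nat) : Int) := by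
      rw [Int.emod_eq_of_lt (by omega) (by omega)]
      omega
    rw [e]
    unfold upR
    simp only [gt_iff_lt]
    rw [if_pos (by omega)]
    omega

lemma mod_down (n r : Nat) (hn : 0 < n) (hr : r < n) :
    (PySem.Int.mod ((r : Int) + 1) (n : Int)).toNat = downR n r := by
  have e : ((r : Int) + 1) = (((r + 1 : Nat)) : Int) := by push_cast; ring
  rw [e, PySem.Int.mod_natCast]
  unfold downR
  omega

lemma scost_append (board : List (List Int)) :
    ∀ (p : List Nat) (c r : Nat),
      scost board c (p ++ [r]) = scost board c p + bcost board r (c + p.length) := by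
  intro p
  induction p with
  | nil => intro c r; simp [scost]
  | cons a t ih =>
      intro c r
      simp only [List.cons_append, scost]
      rw [ih (c + 1) r, List.length_cons,
        show c + (t.length + 1) = c + 1 + t.length from by omega]
      exact (add_assoc _ _ _).symm

lemma spairOf_snoc (board : List (List Int)) (p : List Nat) (r : Nat) :
    spairOf board 0 (p ++ [r]) =
      ((spairOf board 0 p).1 + bcost board r p.length, (spairOf board 0 p).2 ++ [(r : Int)]) := by
  unfold spairOf
  rw [scost_append board p 0 r]
  simp

lemma gpath_cons (board : List (List Int)) (m k r : Nat) :
    ∃ t, gpath board m k r = r :: t := by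
  cases k with
  | zero => exact ⟨[], rfl⟩
  | succ k => exact ⟨_, rfl⟩

lemma castNat_injective : Function.Injective (fun r : Nat => (r : Int)) := by
  intro a b h
  simpa using h

-- ---------- T1: A's DP state is the pointwise minimum over prefix paths ----------
lemma stateIsMin (board : List (List Int)) (hn : 0 < board.length) :
    ∀ c, ∀ r < board.length,
      IsMinP ((apaths board.length c r).map (spairOf board 0))
        ((pvState board c).getD r (0, [])) := by
  intro c
  induction c with
  | zero =>
      intro r hr
      rw [pvState_zero]
      unfold pvInitState
      rw [getD_map_range' _ _ _ _ hr]
      have hsp : spairOf board 0 [r] = ((board.getD r []).getD 0 0, [(r : Int)]) := by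
        simp [spairOf, scost, bcost]
      constructor
      · simp only [apaths, List.map_cons, List.map_nil, List.mem_singleton]
        exact hsp.symm
      · intro x hx
        simp only [apaths, List.map_cons, List.map_nil, List.mem_singleton] at hx
        subst hx
        rw [hsp]
        exact pyLtPair_irrefl _
  | succ c ih =>
      intro r hr
      rw [pvState_succ, pvStep_getD _ _ _ _ hr]
      have hcell : pvCell board (pvState board c) (c + 1) r =
          ((pvMin3 ((pvState board c).getD (upR board.length r) (0, []))
              ((pvState board c).getD r (0, []))
              ((pvState board c).getD (downR board.length r) (0, []))).1 +
            bcost board r (c + 1),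
           (pvMin3 ((pvState board c).getD (upR board.length r) (0, []))
              ((pvState board c).getD r (0, []))
              ((pvState board c).getD (downR board.length r) (0, []))).2 ++ [(r : Int)]) := rfl
      rw [hcell]
      have hb3 := pvMin3_mem ((pvState board c).getD (upR board.length r) (0, []))
        ((pvState board c).getD r (0, []))
        ((pvState board c).getD (downR board.length r) (0, []))
      have hblen : (pvMin3 ((pvState board c).getD (upR board.length r) (0, []))
          ((pvState board c).getD r (0, []))
          ((pvState board c).getD (downR board.length r) (0, []))).2.length = c + 1 := by
        rcases hb3 with h | h | h <;> rw [h] <;>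
          exact pvState_path_length board c _
            (nbrs_lt hn hr _ (by simp [nbrs]))
      constructor
      · -- membership
        have key : ∀ u, u ∈ nbrs board.length r →
            pvMin3 ((pvState board c).getD (upR board.length r) (0, []))
              ((pvState board c).getD r (0, []))
              ((pvState board c).getD (downR board.length r) (0, [])) =
              (pvState board c).getD u (0, []) →
            ((pvMin3 ((pvState board c).getD (upR board.length r) (0, []))
                ((pvState board c).getD r (0, []))
                ((pvState board c).getD (downR board.length r) (0, []))).1 +
              bcost board r (c + 1),
             (pvMin3 ((pvState board c).getD (upR board.length r) (0, []))
                ((pvState board c).getD r (0, []))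
                ((pvState board c).getD (downR board.length r) (0, []))).2 ++ [(r : Int)]) ∈
              (apaths board.length (c + 1) r).map (spairOf board 0) := by
          intro u hu hb
          have hun : u < board.length := nbrs_lt hn hr u hu
          obtain ⟨p, hp, hsp⟩ := List.mem_map.mp (ih u hun).1
          apply List.mem_map.mpr
          refine ⟨p ++ [r], ?_, ?_⟩
          · simp only [apaths, List.mem_flatMap, List.mem_map]
            exact ⟨u, hu, p, hp, rfl⟩
          · rw [spairOf_snoc, hsp, hb, apaths_length board.length c u p hp]
        rcases hb3 with h | h | h
        · exact key _ (by simp [nbrs]) h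
        · exact key _ (by simp [nbrs]) h
        · exact key _ (by simp [nbrs]) h
      · -- lower bound
        intro e he
        obtain ⟨q, hq, rfl⟩ := List.mem_map.mp he
        simp only [apaths, List.mem_flatMap, List.mem_map] at hq
        obtain ⟨u, hu, p, hp, rfl⟩ := hq
        have hun : u < board.length := nbrs_lt hn hr u hu
        have hlb := (ih u hun).2 (spairOf board 0 p) (List.mem_map_of_mem hp)
        have hlp : (spairOf board 0 p).2.length = c + 1 := by
          show (p.map (fun v : Nat => (v : Int))).length = c + 1
          simp [apaths_length board.length c u p hp]
        have hlu : ((pvState board c).getD u (0, [])).2.length = c + 1 :=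
          pvState_path_length board c u hun
        rw [spairOf_snoc board p r, apaths_length board.length c u p hp]
        have h1 : pyLtPair
            ((spairOf board 0 p).1 + bcost board r (c + 1),
             (spairOf board 0 p).2 ++ [(r : Int)])
            (((pvState board c).getD u (0, [])).1 + bcost board r (c + 1),
             ((pvState board c).getD u (0, [])).2 ++ [(r : Int)]) = false := by
          rw [pyLtPair_shift _ _ _ _ (by rw [hlp, hlu])]
          exact hlb
        have h2 : pyLtPair
            (((pvState board c).getD u (0, [])).1 + bcost board r (c + 1),
             ((pvState board c).getD u (0, [])).2 ++ [(r : Int)])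
            ((pvMin3 ((pvState board c).getD (upR board.length r) (0, []))
                ((pvState board c).getD r (0, []))
                ((pvState board c).getD (downR board.length r) (0, []))).1 +
              bcost board r (c + 1),
             (pvMin3 ((pvState board c).getD (upR board.length r) (0, []))
                ((pvState board c).getD r (0, []))
                ((pvState board c).getD (downR board.length r) (0, []))).2 ++ [(r : Int)]) =
            false := by
          rw [pyLtPair_shift _ _ _ _ (by rw [hlu, hblen])]
          have hlb3 := pvMin3_lb ((pvState board c).getD (upR board.length r) (0, []))
            ((pvState board c).getD r (0, []))
            ((pvState board c).getD (downR board.length r) (0, []))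
          simp only [nbrs, List.mem_cons, List.not_mem_nil, or_false] at hu
          rcases hu with rfl | rfl | rfl
          · exact hlb3.1
          · exact hlb3.2.1
          · exact hlb3.2.2
        exact pyLtPair_nle_trans _ _ _ h2 h1

lemma A_isMin (board : List (List Int)) (hn : 0 < board.length)
    (hm : 0 < (board.getD 0 []).length) :
    IsMinP (allA board (board.getD 0 []).length)
      (pvRunMin (pvState board ((board.getD 0 []).length - 1))) := by
  have hlen := pvState_length board ((board.getD 0 []).length - 1)
  have hne : pvState board ((board.getD 0 []).length - 1) ≠ [] := by
    intro h; rw [h] at hlen; simp at hlen; omega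
  obtain ⟨hmem, hlb⟩ := pvRunMin_isMin _ hne
  obtain ⟨i, hi, hieq⟩ := List.mem_iff_getElem.mp hmem
  have hin : i < board.length := by omega
  have hgetD : (pvState board ((board.getD 0 []).length - 1)).getD i (0, []) =
      pvRunMin (pvState board ((board.getD 0 []).length - 1)) := by
    rw [List.getD_eq_getElem _ _ hi]; exact hieq
  constructor
  · unfold allA
    apply List.mem_flatMap.mpr
    exact ⟨i, List.mem_range.mpr hin,
      hgetD ▸ (stateIsMin board hn ((board.getD 0 []).length - 1) i hin).1⟩
  · intro e he
    unfold allA at he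
    obtain ⟨r, hr, he⟩ := List.mem_flatMap.mp he
    rw [List.mem_range] at hr
    have h1 := (stateIsMin board hn ((board.getD 0 []).length - 1) r hr).2 e he
    have hmemr : (pvState board ((board.getD 0 []).length - 1)).getD r (0, []) ∈
        pvState board ((board.getD 0 []).length - 1) := by
      have hrl : r < (pvState board ((board.getD 0 []).length - 1)).length := by omega
      rw [List.getD_eq_getElem _ _ hrl]
      exact List.getElem_mem hrl
    exact pyLtPair_nle_trans _ _ _ (hlb _ hmemr) h1

-- ---------- T2: the greedy path is the pointwise minimum over suffix paths ----------
lemma pick_spec (board : List (List Int)) (m k r : Nat) (hn : 0 < board.length)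
    (hr : r < board.length) :
    pick board m k r ∈ nbrs board.length r ∧
    Gd board m k (pick board m k r) =
      Gd board m (k + 1) r - bcost board r (m - 1 - (k + 1)) ∧
    (∀ u ∈ nbrs board.length r,
      Gd board m k u = Gd board m (k + 1) r - bcost board r (m - 1 - (k + 1)) →
        pick board m k r ≤ u) := by
  have hGd : Gd board m (k + 1) r = bcost board r (m - 1 - (k + 1)) +
      min (min (Gd board m k (upR board.length r)) (Gd board m k r))
          (Gd board m k (downR board.length r)) := rfl
  have hex : ∃ u ∈ nbrs board.length r,
      Gd board m k u = Gd board m (k + 1) r - bcost board r (m - 1 - (k + 1)) := by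
    have h3 : Gd board m (k + 1) r - bcost board r (m - 1 - (k + 1)) =
          Gd board m k (upR board.length r) ∨
        Gd board m (k + 1) r - bcost board r (m - 1 - (k + 1)) = Gd board m k r ∨
        Gd board m (k + 1) r - bcost board r (m - 1 - (k + 1)) =
          Gd board m k (downR board.length r) := by
      rw [hGd]; omega
    rcases h3 with h | h | h
    · exact ⟨upR board.length r, by simp [nbrs], h.symm⟩
    · exact ⟨r, by simp [nbrs], h.symm⟩
    · exact ⟨downR board.length r, by simp [nbrs], h.symm⟩
  obtain ⟨u0, hu0, hv0⟩ := hex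
  have hu0f : u0 ∈ (nbrs board.length r).filter
      (fun u => Gd board m k u == Gd board m (k + 1) r - bcost board r (m - 1 - (k + 1))) :=
    List.mem_filter.mpr ⟨hu0, by simpa using hv0⟩
  have hne : (nbrs board.length r).filter
      (fun u => Gd board m k u == Gd board m (k + 1) r - bcost board r (m - 1 - (k + 1))) ≠ [] :=
    List.ne_nil_of_mem hu0f
  have hpmem := natMin_mem _ hne
  rw [show natMin ((nbrs board.length r).filter
      (fun u => Gd board m k u == Gd board m (k + 1) r - bcost board r (m - 1 - (k + 1)))) =
      pick board m k r from rfl] at hpmem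
  obtain ⟨hp1, hp2⟩ := List.mem_filter.mp hpmem
  refine ⟨hp1, by simpa using hp2, ?_⟩
  intro u hu hval
  exact natMin_le _ u (List.mem_filter.mpr ⟨hu, by simpa using hval⟩)

lemma greedy_isMin (board : List (List Int)) (hn : 0 < board.length) (m : Nat) :
    ∀ k, k ≤ m - 1 → ∀ r < board.length,
      IsMinP ((spaths board.length k r).map (spairOf board (m - 1 - k)))
        (Gd board m k r, (gpath board m k r).map (fun v : Nat => (v : Int))) := by
  intro k
  induction k with
  | zero =>
      intro _ r hr
      have hsp : spairOf board (m - 1 - 0) [r] = (Gd board m 0 r, [(r : Int)]) := by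
        simp [spairOf, scost, Gd, bcost]
      constructor
      · simp only [spaths, List.map_cons, List.map_nil, List.mem_singleton]
        exact hsp.symm
      · intro x hx
        simp only [spaths, List.map_cons, List.map_nil, List.mem_singleton] at hx
        subst hx
        rw [hsp]
        exact pyLtPair_irrefl _
  | succ k ihk =>
      intro hk1 r hr
      have hk : k ≤ m - 1 := by omega
      obtain ⟨hpmem, hpval, hpmin⟩ := pick_spec board m k r hn hr
      have hpn : pick board m k r < board.length := nbrs_lt hn hr _ hpmem
      obtain ⟨hm1, hm2⟩ := ihk hk (pick board m k r) hpn
      obtain ⟨q0, hq0, hq0eq⟩ := List.mem_map.mp hm1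
      have hq0' : q0 = gpath board m k (pick board m k r) := by
        have h2 := congrArg Prod.snd hq0eq
        have h3 : q0.map (fun v : Nat => (v : Int)) =
            (gpath board m k (pick board m k r)).map (fun v : Nat => (v : Int)) := h2
        exact List.map_injective_iff.mpr castNat_injective h3
      have hgmem : gpath board m k (pick board m k r) ∈
          spaths board.length k (pick board m k r) := hq0' ▸ hq0
      have hgcost : scost board (m - 1 - k) (gpath board m k (pick board m k r)) =
          Gd board m k (pick board m k r) := by
        have h1 := congrArg Prod.fst hq0eq
        rw [hq0'] at h1
        exact h1
      have hc1 : m - 1 - (k + 1) + 1 = m - 1 - k := by omega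
      have hGd : Gd board m (k + 1) r = bcost board r (m - 1 - (k + 1)) +
          min (min (Gd board m k (upR board.length r)) (Gd board m k r))
              (Gd board m k (downR board.length r)) := rfl
      constructor
      · apply List.mem_map.mpr
        refine ⟨r :: gpath board m k (pick board m k r), ?_, ?_⟩
        · simp only [spaths, List.mem_flatMap, List.mem_map]
          exact ⟨pick board m k r, hpmem, _, hgmem, rfl⟩
        · have heq : spairOf board (m - 1 - (k + 1))
              (r :: gpath board m k (pick board m k r)) =
              (Gd board m (k + 1) r,
               ((r :: gpath board m k (pick board m k r)).map (fun v : Nat => (v : Int)))) := by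
            unfold spairOf
            simp only [scost, hc1]
            rw [hgcost, hpval]
            refine Prod.ext ?_ rfl
            show bcost board r (m - 1 - (k + 1)) +
                (Gd board m (k + 1) r - bcost board r (m - 1 - (k + 1))) =
                Gd board m (k + 1) r
            ring
          rw [heq]
          rfl
      · intro e he
        obtain ⟨q, hq, rfl⟩ := List.mem_map.mp he
        simp only [spaths, List.mem_flatMap, List.mem_map] at hq
        obtain ⟨u, hu, q', hq', rfl⟩ := hq
        have hun : u < board.length := nbrs_lt hn hr u hu
        have hlbu := (ihk hk u hun).2 (spairOf board (m - 1 - k) q')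
          (List.mem_map_of_mem hq')
        rw [pyLtPair_false_iff] at hlbu
        simp only [spairOf] at hlbu
        have hsplit : spairOf board (m - 1 - (k + 1)) (r :: q') =
            (bcost board r (m - 1 - (k + 1)) + scost board (m - 1 - k) q',
             (r : Int) :: q'.map (fun v : Nat => (v : Int))) := by
          unfold spairOf
          simp only [scost, List.map_cons, hc1]
        rw [hsplit, pyLtPair_false_iff]
        have hge : Gd board m (k + 1) r - bcost board r (m - 1 - (k + 1)) ≤
            Gd board m k u := by
          have hu2 : u = upR board.length r ∨ u = r ∨ u = downR board.length r := by
            simpa [nbrs] using hu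
          rcases hu2 with h | h | h <;> rw [h, hGd] <;> omega
        by_cases hstrict : Gd board m (k + 1) r <
            bcost board r (m - 1 - (k + 1)) + scost board (m - 1 - k) q'
        · left; exact hstrict
        · right
          have hA1 : scost board (m - 1 - k) q' = Gd board m k u := by
            rcases hlbu with h | ⟨h, _⟩
            · exfalso; omega
            · simpa using h
          refine ⟨by omega, ?_⟩
          show pyLtList ((r : Int) :: q'.map (fun v : Nat => (v : Int)))
              ((r : Int) :: (gpath board m k (pick board m k r)).map (fun v : Nat => (v : Int))) =
              false
          rw [pyLtList_cons_same]
          have hque : Gd board m k u =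
              Gd board m (k + 1) r - bcost board r (m - 1 - (k + 1)) := by omega
          by_cases hup : u = pick board m k r
          · subst hup
            rcases hlbu with h | ⟨_, hlst⟩
            · exfalso; omega
            · simpa using hlst
          · have hplt : pick board m k r < u := by
              have := hpmin u hu hque
              omega
            obtain ⟨t1, rfl⟩ : ∃ t1, q' = u :: t1 := by
              have hh := spaths_head board.length k u q' hq'
              cases q' with
              | nil => simp at hh
              | cons a t => exact ⟨t, by injection hh with h; rw [h]⟩
            obtain ⟨t2, hgp⟩ := gpath_cons board m k (pick board m k r)
            rw [hgp]
            have h1 : ¬ ((u : Int) < (pick board m k r : Int)) := by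
              exact_mod_cast not_lt.mpr (le_of_lt hplt)
            have h2 : ((pick board m k r : Int) < (u : Int)) := by exact_mod_cast hplt
            simp only [List.map_cons, pyLtList, if_neg h1, if_pos h2]

-- ---------- the two candidate sets have the same members ----------
lemma allA_eq_allB (board : List (List Int)) (hn : 0 < board.length)
    (hm : 0 < (board.getD 0 []).length) :
    ∀ x, x ∈ allA board (board.getD 0 []).length ↔ x ∈ allB board (board.getD 0 []).length := by
  intro x
  unfold allA allB
  constructor
  · intro hx
    obtain ⟨r, hr, hx⟩ := List.mem_flatMap.mp hx
    rw [List.mem_range] at hr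
    obtain ⟨q, hq, rfl⟩ := List.mem_map.mp hx
    obtain ⟨hok, _⟩ := (mem_apaths board.length hn ((board.getD 0 []).length - 1) r hr q).mp hq
    have hqne : q ≠ [] := by
      intro h; rw [h] at hok; obtain ⟨hl, _, _⟩ := hok; simp at hl
    obtain ⟨h0, hH⟩ : ∃ h0, q.head? = some h0 := by
      cases q with
      | nil => exact absurd rfl hqne
      | cons a t => exact ⟨a, rfl⟩
    have hh0 : h0 < board.length := by
      apply hok.2.1
      cases q with
      | nil => exact absurd rfl hqne
      | cons a t => injection hH with hH; rw [hH]; exact List.mem_cons_self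
    apply List.mem_flatMap.mpr
    refine ⟨h0, List.mem_range.mpr hh0, List.mem_map.mpr ⟨q, ?_, rfl⟩⟩
    exact (mem_spaths board.length hn ((board.getD 0 []).length - 1) h0 hh0 q).mpr ⟨hok, hH⟩
  · intro hx
    obtain ⟨r, hr, hx⟩ := List.mem_flatMap.mp hx
    rw [List.mem_range] at hr
    obtain ⟨q, hq, rfl⟩ := List.mem_map.mp hx
    obtain ⟨hok, _⟩ := (mem_spaths board.length hn ((board.getD 0 []).length - 1) r hr q).mp hq
    have hqne : q ≠ [] := by
      intro h; rw [h] at hok; obtain ⟨hl, _, _⟩ := hok; simp at hl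
    obtain ⟨l0, hL⟩ : ∃ l0, q.getLast? = some l0 := by
      cases hp : q.getLast? with
      | none => rw [List.getLast?_eq_none_iff] at hp; exact absurd hp hqne
      | some u => exact ⟨u, rfl⟩
    have hl0 : l0 < board.length := by
      apply hok.2.1
      exact List.mem_of_getLast? hL
    apply List.mem_flatMap.mpr
    refine ⟨l0, List.mem_range.mpr hl0, List.mem_map.mpr ⟨q, ?_, rfl⟩⟩
    exact (mem_apaths board.length hn ((board.getD 0 []).length - 1) l0 hl0 q).mpr ⟨hok, hL⟩

-- ---------- port B evaluates to the greedy answer ----------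
def colG (board : List (List Int)) (c : Nat) : List Int :=
  (List.range board.length).map
    (fun r => Gd board (board.getD 0 []).length ((board.getD 0 []).length - 1 - c) r)

def bestStart (board : List (List Int)) : Nat :=
  ((List.range board.length).tail).foldl
    (fun best r => if (colG board 0).getD r 0 < (colG board 0).getD best 0 then r else best) 0

lemma argmin_spec (v : Nat → Int) : ∀ n : Nat, 0 < n →
    ∃ s, (((List.range n).tail).foldl (fun best r => if v r < v best then r else best) 0) = s ∧
      s < n ∧ (∀ r < n, ¬ v r < v s) ∧ (∀ u < s, v s < v u) := by
  intro n
  induction n with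
  | zero => intro h; omega
  | succ n ih =>
      intro _
      by_cases hn : n = 0
      · subst hn
        refine ⟨0, rfl, by omega, ?_, by omega⟩
        intro r hr
        have : r = 0 := by omega
        subst this
        exact lt_irrefl _
      · have hn0 : 0 < n := by omega
        obtain ⟨s, hs, hsn, hlb, hfirst⟩ := ih hn0
        have hrange : (List.range (n + 1)).tail = (List.range n).tail ++ [n] := by
          rw [List.range_succ]
          cases hr : List.range n with
          | nil =>
              have := List.range_eq_nil.mp hr
              omega
          | cons a t => simp
        rw [hrange, List.foldl_append, hs]
        simp only [List.foldl_cons, List.foldl_nil]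
        by_cases hv : v n < v s
        · rw [if_pos hv]
          refine ⟨n, rfl, by omega, ?_, ?_⟩
          · intro r hr
            by_cases hrn : r = n
            · subst hrn; exact lt_irrefl _
            · intro hc
              exact absurd (lt_trans hc hv) (hlb r (by omega))
          · intro u hu
            exact lt_of_lt_of_le hv (not_lt.mp (hlb u (by omega)))
        · rw [if_neg hv]
          refine ⟨s, rfl, by omega, ?_, hfirst⟩
          intro r hr
          by_cases hrn : r = n
          · subst hrn; exact hv
          · exact hlb r (by omega)

lemma bestStart_spec (board : List (List Int)) (hn : 0 < board.length)
    (hm : 0 < (board.getD 0 []).length) :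
    bestStart board < board.length ∧
    (∀ r < board.length,
      ¬ Gd board (board.getD 0 []).length ((board.getD 0 []).length - 1) r <
        Gd board (board.getD 0 []).length ((board.getD 0 []).length - 1) (bestStart board)) ∧
    (∀ u < bestStart board,
      Gd board (board.getD 0 []).length ((board.getD 0 []).length - 1) (bestStart board) <
        Gd board (board.getD 0 []).length ((board.getD 0 []).length - 1) u) := by
  obtain ⟨s, hs, hsn, hlb, hfirst⟩ :=
    argmin_spec (fun r => (colG board 0).getD r 0) board.length hn
  have hbs : bestStart board = s := hs
  have hcol : ∀ r < board.length, (colG board 0).getD r 0 =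
      Gd board (board.getD 0 []).length ((board.getD 0 []).length - 1) r := by
    intro r hr
    unfold colG
    rw [getD_map_range' _ _ _ _ hr, Nat.sub_zero]
  refine ⟨by rw [hbs]; exact hsn, ?_, ?_⟩
  · intro r hr
    rw [hbs]
    have := hlb r hr
    simp only at this
    rwa [hcol r hr, hcol s hsn] at this
  · intro u hu
    rw [hbs] at hu ⊢
    have := hfirst u hu
    simp only at this
    rwa [hcol s hsn, hcol u (by omega)] at this

lemma suffix_fold (board : List (List Int)) (hn : 0 < board.length)
    (hm : 0 < (board.getD 0 []).length) :
    ∀ k, k ≤ (board.getD 0 []).length - 1 →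
      (List.range k).foldl (altBody board)
        [(List.range board.length).map
          (fun r => (board.getD r []).getD ((board.getD 0 []).length - 1) 0)] =
      (List.range' ((board.getD 0 []).length - 1 - k) (k + 1)).map (colG board) := by
  intro k
  induction k with
  | zero =>
      intro _
      simp only [List.range_zero, List.foldl_nil, Nat.sub_zero]
      rw [show List.range' ((board.getD 0 []).length - 1) 1 =
        [(board.getD 0 []).length - 1] from rfl]
      simp only [List.map_cons, List.map_nil]
      congr 1
      unfold colG
      refine List.map_congr_left ?_
      intro r _
      rw [Nat.sub_self]
      rfl
  | succ k ih =>
      intro hk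
      rw [List.range_succ, List.foldl_append]
      simp only [List.foldl_cons, List.foldl_nil]
      rw [ih (by omega)]
      simp only [altBody]
      have hhead : ((List.range' ((board.getD 0 []).length - 1 - k) (k + 1)).map
          (colG board)).headD [] = colG board ((board.getD 0 []).length - 1 - k) := by
        rw [List.range'_succ]
        rfl
      rw [hhead]
      have hcol : (List.range board.length).map (fun (r : Nat) =>
          (board.getD r []).getD ((board.getD 0 []).length - 2 - k) 0 +
            min (min ((colG board ((board.getD 0 []).length - 1 - k)).getD
                  ((PySem.Int.mod ((r : Int) - 1) (board.length : Int)).toNat) 0)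
                ((colG board ((board.getD 0 []).length - 1 - k)).getD r 0))
              ((colG board ((board.getD 0 []).length - 1 - k)).getD
                  ((PySem.Int.mod ((r : Int) + 1) (board.length : Int)).toNat) 0)) =
          colG board ((board.getD 0 []).length - 1 - (k + 1)) := by
        unfold colG
        refine List.map_congr_left ?_
        intro r hr
        rw [List.mem_range] at hr
        rw [mod_up board.length r hn hr, mod_down board.length r hn hr]
        rw [getD_map_range' _ _ _ _ (nbrs_lt hn hr _ (by simp [nbrs]) :
          upR board.length r < board.length)]
        rw [getD_map_range' _ _ _ _ hr]
        rw [getD_map_range' _ _ _ _ (nbrs_lt hn hr _ (by simp [nbrs]) :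
          downR board.length r < board.length)]
        rw [show (board.getD 0 []).length - 1 - ((board.getD 0 []).length - 1 - k) = k
          from by omega]
        rw [show (board.getD 0 []).length - 1 -
            ((board.getD 0 []).length - 1 - (k + 1)) = k + 1 from by omega]
        rw [show (board.getD 0 []).length - 2 - k =
            (board.getD 0 []).length - 1 - (k + 1) from by omega]
        rfl
      rw [hcol]
      rw [show List.range' ((board.getD 0 []).length - 1 - (k + 1)) (k + 1 + 1) =
          ((board.getD 0 []).length - 1 - (k + 1)) ::
            List.range' ((board.getD 0 []).length - 1 - k) (k + 1) from by
        rw [List.range'_succ,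
          show (board.getD 0 []).length - 1 - (k + 1) + 1 =
            (board.getD 0 []).length - 1 - k from by omega]]
      rfl

lemma loop_fold (board : List (List Int)) (suffix : List (List Int))
    (hn : 0 < board.length) (hm : 0 < (board.getD 0 []).length)
    (hsuf : ∀ c < (board.getD 0 []).length, suffix.getD c [] = colG board c) :
    ∀ k, k ≤ (board.getD 0 []).length - 1 → ∀ r < board.length, ∀ pre : List Int,
      (List.range' ((board.getD 0 []).length - k) k).foldl (altStep board suffix)
          (pre ++ [(r : Int)], r) =
        (pre ++ (gpath board (board.getD 0 []).length k r).map (fun v : Nat => (v : Int)),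
         glast board (board.getD 0 []).length k r) := by
  intro k
  induction k with
  | zero =>
      intro _ r hr pre
      simp [gpath, glast]
  | succ k ih =>
      intro hk r hr pre
      have hcons : List.range' ((board.getD 0 []).length - (k + 1)) (k + 1) =
          ((board.getD 0 []).length - (k + 1)) ::
            List.range' ((board.getD 0 []).length - k) k := by
        rw [List.range'_succ,
          show (board.getD 0 []).length - (k + 1) + 1 =
            (board.getD 0 []).length - k from by omega]
      rw [hcons]
      simp only [List.foldl_cons]
      have hstep : altStep board suffix (pre ++ [(r : Int)], r)
          ((board.getD 0 []).length - (k + 1)) =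
          ((pre ++ [(r : Int)]) ++ [((pick board (board.getD 0 []).length k r : Nat) : Int)],
           pick board (board.getD 0 []).length k r) := by
        simp only [altStep]
        rw [mod_up board.length r hn hr, mod_down board.length r hn hr]
        rw [hsuf ((board.getD 0 []).length - (k + 1) - 1) (by omega),
            hsuf ((board.getD 0 []).length - (k + 1)) (by omega)]
        rw [show (colG board ((board.getD 0 []).length - (k + 1) - 1)).getD r 0 =
            Gd board (board.getD 0 []).length (k + 1) r from by
          unfold colG
          rw [getD_map_range' _ _ _ _ hr,
            show (board.getD 0 []).length - 1 - ((board.getD 0 []).length - (k + 1) - 1) =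
              k + 1 from by omega]]
        rw [show (board.getD 0 []).length - (k + 1) - 1 =
            (board.getD 0 []).length - 1 - (k + 1) from by omega]
        have hfilt : ([upR board.length r, r, downR board.length r]).filter
            (fun u => (colG board ((board.getD 0 []).length - (k + 1))).getD u 0 ==
              Gd board (board.getD 0 []).length (k + 1) r -
                (board.getD r []).getD ((board.getD 0 []).length - 1 - (k + 1)) 0) =
            (nbrs board.length r).filter
              (fun u => Gd board (board.getD 0 []).length k u ==
                Gd board (board.getD 0 []).length (k + 1) r -
                  bcost board r ((board.getD 0 []).length - 1 - (k + 1))) := by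
          apply List.filter_congr
          intro u hu
          have hun : u < board.length := nbrs_lt hn hr u hu
          unfold colG
          rw [getD_map_range' _ _ _ _ hun,
            show (board.getD 0 []).length - 1 - ((board.getD 0 []).length - (k + 1)) = k
              from by omega]
          rfl
        rw [hfilt]
        rfl
      rw [hstep]
      have hpn : pick board (board.getD 0 []).length k r < board.length :=
        nbrs_lt hn hr _ (pick_spec board (board.getD 0 []).length k r hn hr).1
      rw [ih (by omega) (pick board (board.getD 0 []).length k r) hpn (pre ++ [(r : Int)])]
      rw [show gpath board (board.getD 0 []).length (k + 1) r =
          r :: gpath board (board.getD 0 []).length k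
            (pick board (board.getD 0 []).length k r) from rfl]
      rw [List.map_cons, List.append_assoc]
      rfl

lemma portB_val (board : List (List Int)) (hn : 0 < board.length)
    (hm : 0 < (board.getD 0 []).length) :
    search_shortest_path_alt board =
      ((gpath board (board.getD 0 []).length ((board.getD 0 []).length - 1)
          (bestStart board)).map (fun v : Nat => (v : Int)),
       Gd board (board.getD 0 []).length ((board.getD 0 []).length - 1) (bestStart board)) := by
  simp only [search_shortest_path_alt]
  have hsfold := suffix_fold board hn hm ((board.getD 0 []).length - 1) (le_refl _)
  rw [show (board.getD 0 []).length - 1 - ((board.getD 0 []).length - 1) = 0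
      from Nat.sub_self _,
    show (board.getD 0 []).length - 1 + 1 = (board.getD 0 []).length from by omega] at hsfold
  rw [hsfold]
  have hcol0 : ((List.range' 0 (board.getD 0 []).length).map (colG board)).headD [] =
      colG board 0 := by
    rw [show (board.getD 0 []).length = ((board.getD 0 []).length - 1) + 1 from by omega,
      List.range'_succ]
    rfl
  rw [hcol0]
  rw [show ((List.range board.length).tail).foldl
      (fun best r => if (colG board 0).getD r 0 < (colG board 0).getD best 0 then r else best)
      0 = bestStart board from rfl]
  have hsuf : ∀ c < (board.getD 0 []).length,
      ((List.range' 0 (board.getD 0 []).length).map (colG board)).getD c [] =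
        colG board c := by
    intro c hc
    rw [← List.range_eq_range']
    exact getD_map_range' _ _ _ _ hc
  obtain ⟨hsn, _, _⟩ := bestStart_spec board hn hm
  have hloop := loop_fold board _ hn hm hsuf ((board.getD 0 []).length - 1) (le_refl _)
    (bestStart board) hsn []
  rw [show (board.getD 0 []).length - ((board.getD 0 []).length - 1) = 1 from by omega]
    at hloop
  simp only [List.nil_append] at hloop
  rw [hloop]
  refine Prod.ext rfl ?_
  show (colG board 0).getD (bestStart board) 0 = _
  unfold colG
  rw [getD_map_range' _ _ _ _ hsn, Nat.sub_zero]

lemma B_isMin (board : List (List Int)) (hn : 0 < board.length)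
    (hm : 0 < (board.getD 0 []).length) :
    IsMinP (allB board (board.getD 0 []).length)
      (Gd board (board.getD 0 []).length ((board.getD 0 []).length - 1) (bestStart board),
       (gpath board (board.getD 0 []).length ((board.getD 0 []).length - 1)
          (bestStart board)).map (fun v : Nat => (v : Int))) := by
  obtain ⟨hsn, hlb, hfirst⟩ := bestStart_spec board hn hm
  have hg := greedy_isMin board hn (board.getD 0 []).length
    ((board.getD 0 []).length - 1) (le_refl _)
  rw [Nat.sub_self] at hg
  constructor
  · unfold allB
    apply List.mem_flatMap.mpr
    exact ⟨bestStart board, List.mem_range.mpr hsn, (hg (bestStart board) hsn).1⟩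
  · intro e he
    unfold allB at he
    obtain ⟨u, hu, he⟩ := List.mem_flatMap.mp he
    rw [List.mem_range] at hu
    have hlbu := (hg u hu).2 e he
    have hcmp : pyLtPair
        (Gd board (board.getD 0 []).length ((board.getD 0 []).length - 1) u,
         (gpath board (board.getD 0 []).length ((board.getD 0 []).length - 1) u).map
           (fun v : Nat => (v : Int)))
        (Gd board (board.getD 0 []).length ((board.getD 0 []).length - 1) (bestStart board),
         (gpath board (board.getD 0 []).length ((board.getD 0 []).length - 1)
            (bestStart board)).map (fun v : Nat => (v : Int))) = false := by
      rw [pyLtPair_false_iff]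
      by_cases hlt : Gd board (board.getD 0 []).length ((board.getD 0 []).length - 1)
          (bestStart board) <
          Gd board (board.getD 0 []).length ((board.getD 0 []).length - 1) u
      · left; exact hlt
      · right
        have hnl := hlb u hu
        refine ⟨by omega, ?_⟩
        by_cases hus : u = bestStart board
        · subst hus
          exact pyLtList_irrefl _
        · have hsu : bestStart board < u := by
            by_contra hc
            push_neg at hc
            have : u < bestStart board := by omega
            have := hfirst u this
            omega
          obtain ⟨t1, hg1⟩ := gpath_cons board (board.getD 0 []).length
            ((board.getD 0 []).length - 1) u
          obtain ⟨t2, hg2⟩ := gpath_cons board (board.getD 0 []).length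
            ((board.getD 0 []).length - 1) (bestStart board)
          rw [hg1, hg2]
          have h1 : ¬ ((u : Int) < (bestStart board : Int)) := by
            exact_mod_cast not_lt.mpr (le_of_lt hsu)
          have h2 : ((bestStart board : Int) < (u : Int)) := by exact_mod_cast hsu
          simp only [List.map_cons, pyLtList, if_neg h1, if_pos h2]
    exact pyLtPair_nle_trans _ _ _ hcmp hlbu

-- ===== VERDICT (by name: the statement is the Claim_ definition above) =====
theorem search_shortest_path_spec : Claim_equal_search_shortest_path := by
  intro board _hdom hpre
  obtain ⟨hne, hm0, _hrows⟩ := hpre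
  have hn : 0 < board.length := by cases board with | nil => simp at hne | cons a t => simp
  have hm : 0 < (board.getD 0 []).length := by
    cases board with | nil => simp at hne | cons a t => simpa using hm0
  unfold Spec_search_shortest_path
  rw [portA_eq board hn hm, portB_val board hn hm]
  have hbest :
      pvRunMin (pvState board ((board.getD 0 []).length - 1)) =
        (Gd board (board.getD 0 []).length ((board.getD 0 []).length - 1) (bestStart board),
         (gpath board (board.getD 0 []).length ((board.getD 0 []).length - 1)
            (bestStart board)).map (fun v : Nat => (v : Int))) :=
    IsMinP_congr (A_isMin board hn hm) (B_isMin board hn hm) (allA_eq_allB board hn hm)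
  unfold pvAnswer
  rw [hbest]
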